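-- pv_equiv track=rewrite | github.com/reyagarg13/MediScribe-AI | backend/app/advanced_prescription_ocr.py | _categorize_instruction
-- ===== SOURCE A (Python) =====
-- def _categorize_instruction(instruction_text: str) -> str:
--     """Categorize special instructions"""
--     instruction_lower = instruction_text.lower()
--
--     if any(term in instruction_lower for term in ['meal', 'food']):
--         return 'food_related'
--     elif any(term in instruction_lower for term in ['crush', 'swallow']):
--         return 'administration'
--     elif any(term in instruction_lower for term in ['store', 'refrigerate']):
--         return 'storage'
--     elif any(term in instruction_lower for term in ['needed', 'prn']):
--         return 'as_needed'
--
--     return 'general'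
-- ===== SOURCE B (Python) =====
-- # Keyword -> priority (smaller = higher-priority category)
-- KEYWORD_PRIORITY = {
--     'meal': 0, 'food': 0,
--     'crush': 1, 'swallow': 1,
--     'store': 2, 'refrigerate': 2,
--     'needed': 3, 'prn': 3,
-- }
-- CATEGORIES = ['food_related', 'administration', 'storage', 'as_needed', 'general']
--
--
-- def _categorize_instruction(instruction_text: str) -> str:
--     """Categorize special instructions"""
--     text = instruction_text.lower()
--     best = len(CATEGORIES) - 1  # 'general'
--     for keyword, priority in KEYWORD_PRIORITY.items():
--         if keyword in text:
--             best = min(best, priority)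
--     return CATEGORIES[best]
-- ===== Notes on version B (the rewrite author's own statement) =====
-- stated objective: alternative
-- what changed: Replaced the ordered first-match if-elif chain by a flat keyword->priority map scanned exhaustively in one pass, accumulating the minimum matched priority and indexing a category array with it (no short-circuit, no rule groups).
import Mathlib
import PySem

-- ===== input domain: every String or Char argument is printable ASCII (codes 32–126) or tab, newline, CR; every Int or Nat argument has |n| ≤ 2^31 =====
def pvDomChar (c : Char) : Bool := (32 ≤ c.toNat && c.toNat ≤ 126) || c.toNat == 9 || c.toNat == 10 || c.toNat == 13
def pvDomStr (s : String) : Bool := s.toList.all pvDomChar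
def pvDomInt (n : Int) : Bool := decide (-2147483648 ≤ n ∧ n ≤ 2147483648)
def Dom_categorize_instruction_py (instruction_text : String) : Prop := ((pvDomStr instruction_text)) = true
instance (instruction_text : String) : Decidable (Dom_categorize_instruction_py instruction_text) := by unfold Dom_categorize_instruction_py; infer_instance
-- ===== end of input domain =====

-- B replaces A's ordered first-match if-elif chain by an exhaustive one-pass min-priority
-- reduction over a flat keyword->priority table, then indexes a category array (alternative
-- decomposition, same behaviour).


-- ===== PORT A =====
def categorize_instruction_py (instruction_text : String) : String :=
  let instruction_lower := PySem.Str.lower instruction_text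
  if ["meal", "food"].any (fun term => PySem.Str.isIn term instruction_lower) then
    "food_related"
  else if ["crush", "swallow"].any (fun term => PySem.Str.isIn term instruction_lower) then
    "administration"
  else if ["store", "refrigerate"].any (fun term => PySem.Str.isIn term instruction_lower) then
    "storage"
  else if ["needed", "prn"].any (fun term => PySem.Str.isIn term instruction_lower) then
    "as_needed"
  else
    "general"

-- ===== PORT B =====
def pvKeywordPriority : List (String × Nat) :=
  [("meal", 0), ("food", 0), ("crush", 1), ("swallow", 1),
   ("store", 2), ("refrigerate", 2), ("needed", 3), ("prn", 3)]

def pvCategories : List String :=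
  ["food_related", "administration", "storage", "as_needed", "general"]

def categorize_instruction_py_alt (instruction_text : String) : String :=
  let text := PySem.Str.lower instruction_text
  let best := pvKeywordPriority.foldl
    (fun best kp => if PySem.Str.isIn kp.1 text then min best kp.2 else best)
    (pvCategories.length - 1)
  pvCategories.getD best "general"

-- ===== PRECONDITION & SPEC =====
def Spec_categorize_instruction_py (instruction_text : String) (out : String) : Prop := out = categorize_instruction_py_alt instruction_text
instance (instruction_text : String) (out : String) : Decidable (Spec_categorize_instruction_py instruction_text out) := by unfold Spec_categorize_instruction_py; infer_instance

-- ===== CLAIM (what is proved, stated in full; the proofs are below) =====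
def Claim_equal_categorize_instruction_py : Prop := ∀ (instruction_text : String), Dom_categorize_instruction_py instruction_text → Spec_categorize_instruction_py instruction_text (categorize_instruction_py instruction_text)

-- ===== LEMMAS AND PROOFS =====

-- Both ports are functions of the same eight Boolean substring tests; the claim reduces
-- to this 2^8-case Boolean identity.
theorem pvBoolCases : ∀ (b1 b2 b3 b4 b5 b6 b7 b8 : Bool),
    (if b1 || (b2 || false) then "food_related"
     else if b3 || (b4 || false) then "administration"
     else if b5 || (b6 || false) then "storage"
     else if b7 || (b8 || false) then "as_needed"
     else "general")
    = pvCategories.getD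
        (pvKeywordPriority.foldl
          (fun best kp =>
            if (if kp.1 = "meal" then b1 else if kp.1 = "food" then b2
                else if kp.1 = "crush" then b3 else if kp.1 = "swallow" then b4
                else if kp.1 = "store" then b5 else if kp.1 = "refrigerate" then b6
                else if kp.1 = "needed" then b7 else b8) then min best kp.2 else best)
          (pvCategories.length - 1)) "general" := by
  decide

-- ===== VERDICT (by name: the statement is the Claim_ definition above) =====
theorem categorize_instruction_py_spec : Claim_equal_categorize_instruction_py := by
  intro t _
  unfold Spec_categorize_instruction_py categorize_instruction_py categorize_instruction_py_alt
  simp only [List.any_cons, List.any_nil]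
  have h := pvBoolCases
    (PySem.Str.isIn "meal" (PySem.Str.lower t)) (PySem.Str.isIn "food" (PySem.Str.lower t))
    (PySem.Str.isIn "crush" (PySem.Str.lower t)) (PySem.Str.isIn "swallow" (PySem.Str.lower t))
    (PySem.Str.isIn "store" (PySem.Str.lower t)) (PySem.Str.isIn "refrigerate" (PySem.Str.lower t))
    (PySem.Str.isIn "needed" (PySem.Str.lower t)) (PySem.Str.isIn "prn" (PySem.Str.lower t))
  simpa [pvKeywordPriority, pvCategories, List.foldl] using h
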